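-- pv_equiv track=rewrite | github.com/pypi-data/pypi-mirror-181 | packages/aiocomfoconnect/aiocomfoconnect-0.1.2.tar.gz/aiocomfoconnect-0.1.2/aiocomfoconnect/util.py | bytearray_to_bits
-- ===== SOURCE A (Python) =====
-- def bytearray_to_bits(bytearray):
--     """Convert a bytearray to a list of set bits."""
--     bits = []
--     j = 0
--     for byte in bytearray:
--         for i in range(8):
--             if byte & (1 << i):
--                 bits.append(j)
--             j += 1
--     return bits
-- ===== SOURCE B (Python) =====
-- def bytearray_to_bits(bytearray):
--     """Convert a bytearray to a list of set bits."""
--     bits = []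
--     for idx, byte in enumerate(bytearray):
--         base = idx * 8
--         b = byte & 0xFF
--         while b:
--             nb = b & (b - 1)  # b with its lowest set bit cleared
--             bits.append(base + (b - nb).bit_length() - 1)
--             b = nb
--     return bits
-- ===== Notes on version B (the rewrite author's own statement) =====
-- stated objective: alternative
-- what changed: A scans all 8 bit positions of every byte with a fixed inner for-loop and a running global bit counter; B enumerates bytes to get a base offset idx*8 and runs a clear-lowest-set-bit loop (b &= b-1) on the masked byte, iterating only over set bits and computing each position via bit_length.
import Mathlib
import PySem

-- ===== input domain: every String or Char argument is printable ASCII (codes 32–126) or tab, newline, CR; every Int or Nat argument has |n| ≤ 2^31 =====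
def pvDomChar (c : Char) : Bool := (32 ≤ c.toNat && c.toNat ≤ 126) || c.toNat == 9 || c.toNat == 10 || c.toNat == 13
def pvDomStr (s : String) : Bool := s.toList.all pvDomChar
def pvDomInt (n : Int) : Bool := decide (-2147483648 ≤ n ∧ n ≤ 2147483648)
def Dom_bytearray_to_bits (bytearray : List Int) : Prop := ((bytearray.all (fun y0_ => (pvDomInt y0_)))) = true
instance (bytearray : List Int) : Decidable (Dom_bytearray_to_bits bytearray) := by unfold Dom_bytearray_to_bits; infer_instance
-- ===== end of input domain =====

-- B rewrites A's fixed 8-iteration inner scan as a clear-lowest-bit loop over the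
-- masked byte, visiting only the set bits (objective: alternative decomposition).

-- ===== PORT A =====
-- state is (bits, j), exactly A's two locals
def bytearray_to_bits (bytearray : List Int) : List Int :=
  (bytearray.foldl
    (fun (st : List Int × Int) byte =>
      (List.range 8).foldl
        (fun (st2 : List Int × Int) (i : Nat) =>
          (if PySem.Int.band byte ((1 : Int) <<< i) ≠ 0 then st2.1 ++ [st2.2] else st2.1,
           st2.2 + 1))
        st)
    ([], 0)).1

-- ===== PORT B =====
-- the inner `while b:` loop of Source B; b = byte & 0xFF is nonnegative, so carrying it as
-- a Nat is exact, and `(b - nb).bit_length() - 1` is `Nat.log2 (b - nb)` exactly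
-- (b - nb is the lowest set bit of b, hence positive inside the loop)
def altByte (base : Int) (b : Nat) (acc : List Int) : List Int :=
  if h : b = 0 then acc
  else
    have : b &&& (b - 1) < b := Nat.lt_of_le_of_lt Nat.and_le_right (by omega)
    let nb := b &&& (b - 1)
    altByte base nb (acc ++ [base + ((b - nb).log2 : Int)])
termination_by b

def bytearray_to_bits_alt (bytearray : List Int) : List Int :=
  (PySem.List.enumerate bytearray 0).foldl
    (fun acc p => altByte (p.1 * 8) (PySem.Int.band p.2 255).toNat acc) []

-- ===== PRECONDITION & SPEC =====
def Spec_bytearray_to_bits (bytearray : List Int) (out : List Int) : Prop := out = bytearray_to_bits_alt bytearray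
instance (bytearray : List Int) (out : List Int) : Decidable (Spec_bytearray_to_bits bytearray out) := by unfold Spec_bytearray_to_bits; infer_instance

-- ===== CLAIM (what is proved, stated in full; the proofs are below) =====
def Claim_equal_bytearray_to_bits : Prop := ∀ (bytearray : List Int), Dom_bytearray_to_bits bytearray → Spec_bytearray_to_bits bytearray (bytearray_to_bits bytearray)

-- ===== LEMMAS AND PROOFS =====

-- fuel-indexed version of B's inner loop positions (fuel ≥ b is enough: b decreases)
def gB : Nat → Nat → List Nat
  | _, 0 => []
  | 0, _ + 1 => []
  | f + 1, b + 1 =>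
    ((b + 1) - ((b + 1) &&& b)).log2 :: gB f ((b + 1) &&& b)

theorem toNat_ofNat (n : Nat) : (Int.ofNat n).toNat = n := rfl

-- m with the common bits of n removed is the bitwise difference
theorem sub_and_ldiff (m : Nat) : ∀ n, m - (m &&& n) = m.ldiff n := by
  induction m using Nat.binaryRec with
  | zero =>
    intro n
    have : Nat.ldiff 0 n = 0 := by
      apply Nat.eq_of_testBit_eq; intro i; simp [Nat.testBit_ldiff]
    simp [this]
  | bit b m ih =>
    intro n
    induction n using Nat.binaryRec with
    | zero =>
      have h1 : Nat.bit b m &&& 0 = 0 := Nat.and_zero _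
      have h2 : Nat.ldiff (Nat.bit b m) 0 = Nat.bit b m := by
        apply Nat.eq_of_testBit_eq; intro i; simp [Nat.testBit_ldiff]
      omega
    | bit b' n' _ =>
      rw [Nat.land_bit, Nat.ldiff_bit, Nat.bit_val, Nat.bit_val, Nat.bit_val]
      have hk : m &&& n' ≤ m := Nat.and_le_left
      have := ih n'
      cases b <;> cases b' <;> simp [Bool.toNat] at * <;> omega

theorem ne_zero_iff_testBit (n : Nat) : n ≠ 0 ↔ ∃ j, n.testBit j = true := by
  constructor
  · intro h
    by_contra hc
    push Not at hc
    exact h (Nat.eq_of_testBit_eq (fun i => by simpa using Bool.eq_false_iff.mpr (hc i)))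
  · rintro ⟨j, hj⟩ h
    simp [h] at hj

theorem band_negSucc_ofNat (m n : Nat) :
    PySem.Int.band (Int.negSucc m) (Int.ofNat n) = Int.ofNat (Nat.ldiff n m) := by
  have h1 : ¬ (0 : Int) ≤ Int.negSucc m := by omega
  have h2 : (0 : Int) ≤ Int.ofNat n := by simp [Int.ofNat_eq_natCast]
  have h3 : (-(Int.negSucc m) - 1).toNat = m := by rw [Int.negSucc_eq]; omega
  simp only [PySem.Int.band, h1, h2, if_true, if_false, h3, toNat_ofNat]
  rw [sub_and_ldiff]; rfl

theorem band_ofNat_ofNat (m n : Nat) :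
    PySem.Int.band (Int.ofNat m) (Int.ofNat n) = Int.ofNat (m &&& n) := by
  have h2 : (0 : Int) ≤ Int.ofNat n := by simp [Int.ofNat_eq_natCast]
  have h1 : (0 : Int) ≤ Int.ofNat m := by simp [Int.ofNat_eq_natCast]
  simp only [PySem.Int.band, h1, h2, if_true, toNat_ofNat]
  rfl

theorem testBit_255 {i : Nat} (h : i < 8) : Nat.testBit 255 i = true := by
  interval_cases i <;> decide

-- the masked byte is a byte
theorem band255_lt (byte : Int) : (PySem.Int.band byte 255).toNat < 256 := by
  have h255 : (255 : Int) = Int.ofNat 255 := rfl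
  cases byte with
  | ofNat m =>
    rw [h255, band_ofNat_ofNat]
    have : m &&& 255 ≤ 255 := Nat.and_le_right
    rw [toNat_ofNat]; omega
  | negSucc m =>
    rw [h255, band_negSucc_ofNat]
    have : Nat.ldiff 255 m ≤ 255 := by rw [← sub_and_ldiff]; omega
    rw [toNat_ofNat]; omega

-- A's bit test agrees with the testBit of the masked byte, for i < 8
theorem cond_eq_testBit (byte : Int) {i : Nat} (h : i < 8) :
    (decide (PySem.Int.band byte ((1 : Int) <<< i) ≠ 0))
      = (PySem.Int.band byte 255).toNat.testBit i := by
  have hsh : (1 : Int) <<< i = Int.ofNat (2 ^ i) := by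
    show Int.ofNat (1 <<< i) = Int.ofNat (2 ^ i)
    rw [Nat.shiftLeft_eq, Nat.one_mul]
  have h255 : (255 : Int) = Int.ofNat 255 := rfl
  have hpow : (2 : Nat) ^ i ≠ 0 := pow_ne_zero _ (by norm_num)
  cases byte with
  | ofNat m =>
    rw [hsh, h255, band_ofNat_ofNat, band_ofNat_ofNat, toNat_ofNat]
    have htb : (m &&& 255).testBit i = m.testBit i := by
      rw [Nat.testBit_and, testBit_255 h, Bool.and_true]
    rw [htb, Nat.and_two_pow]
    cases hb : m.testBit i <;> simp [hb]
  | negSucc m =>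
    rw [hsh, h255, band_negSucc_ofNat, band_negSucc_ofNat, toNat_ofNat]
    have hL : Nat.ldiff (2 ^ i) m ≠ 0 ↔ m.testBit i = false := by
      constructor
      · intro hz
        rcases (ne_zero_iff_testBit _).mp hz with ⟨j, hj⟩
        rw [Nat.testBit_ldiff, Nat.testBit_two_pow] at hj
        rcases Bool.and_eq_true_iff.mp hj with ⟨hij, hmj⟩
        have hji : i = j := by simpa using hij
        subst hji
        simpa using hmj
      · intro hf
        apply (ne_zero_iff_testBit _).mpr
        exact ⟨i, by simp [Nat.testBit_ldiff, hf]⟩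
    have hR : (Nat.ldiff 255 m).testBit i = !m.testBit i := by
      rw [Nat.testBit_ldiff, testBit_255 h, Bool.true_and]
    rw [hR]
    by_cases hb : m.testBit i = true
    · have h0 : Nat.ldiff (2 ^ i) m = 0 := by
        by_contra hc; have := hL.mp hc; simp [hb] at this
      simp [h0, hb]
    · have hb' : m.testBit i = false := by simpa using hb
      have h0 : Nat.ldiff (2 ^ i) m ≠ 0 := hL.mpr hb'
      simp [h0, hb']

-- B's loop lists exactly the set bits of a byte, in ascending order
set_option maxRecDepth 10000 in
theorem gB_filter : ∀ b : Fin 256, gB b.val b.val = (List.range 8).filter (fun i => b.val.testBit i) := by decide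

-- altByte in terms of gB
theorem altByte_gB : ∀ (f b : Nat) (base : Int) (acc : List Int), b ≤ f →
    altByte base b acc = acc ++ (gB f b).map (fun i => base + (i : Int)) := by
  intro f
  induction f with
  | zero =>
    intro b base acc hb
    have : b = 0 := by omega
    subst this
    rw [altByte]
    simp [gB]
  | succ f ih =>
    intro b base acc hb
    cases b with
    | zero => rw [altByte]; simp [gB]
    | succ b' =>
      rw [altByte]
      have hnb : (b' + 1) &&& b' ≤ f := le_trans Nat.and_le_right (by omega)
      simp only [Nat.succ_ne_zero, dite_false, gB, Nat.add_sub_cancel]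
      rw [ih _ _ _ hnb]
      simp

-- the selected positions of A's inner scan
def selGo (c : Nat → Bool) : List Nat → Int → List Int
  | [], _ => []
  | i :: rest, j => (if c i then [j] else []) ++ selGo c rest (j + 1)

theorem innerA_go (P : Nat → Prop) [DecidablePred P] :
    ∀ (is : List Nat) (acc : List Int) (j : Int),
      is.foldl (fun (st2 : List Int × Int) (i : Nat) =>
          (if P i then st2.1 ++ [st2.2] else st2.1, st2.2 + 1)) (acc, j)
        = (acc ++ selGo (fun i => decide (P i)) is j, j + is.length) := by
  intro is
  induction is with
  | nil => intro acc j; simp [selGo]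
  | cons i rest ih =>
    intro acc j
    simp only [List.foldl_cons, selGo]
    rw [ih]
    by_cases h : P i <;> simp [h] <;> ring_nf

theorem selGo_range' (c : Nat → Bool) :
    ∀ (n s : Nat) (j : Int),
      selGo c (List.range' s n) (j + s) = ((List.range' s n).filter c).map (fun i => j + (i : Int)) := by
  intro n
  induction n with
  | zero => intro s j; simp [selGo]
  | succ n ih =>
    intro s j
    rw [List.range'_succ]
    simp only [selGo, List.filter_cons]
    have : j + (s : Int) + 1 = j + ((s + 1 : Nat) : Int) := by push_cast; ring
    rw [this, ih (s + 1) j]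
    cases h : c s <;> simp [h]

-- flattened forms of the two folds
def flatA : List Int → Int → List Int
  | [], _ => []
  | byte :: t, j =>
      selGo (fun i => decide (PySem.Int.band byte ((1 : Int) <<< i) ≠ 0)) (List.range 8) j
        ++ flatA t (j + 8)

def flatB : List Int → Int → List Int
  | [], _ => []
  | byte :: t, k =>
      (gB (PySem.Int.band byte 255).toNat (PySem.Int.band byte 255).toNat).map
          (fun i => k * 8 + (i : Int))
        ++ flatB t (k + 1)

theorem foldA_flat : ∀ (l : List Int) (acc : List Int) (j : Int),
    (l.foldl
      (fun (st : List Int × Int) byte =>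
        (List.range 8).foldl
          (fun (st2 : List Int × Int) (i : Nat) =>
            (if PySem.Int.band byte ((1 : Int) <<< i) ≠ 0 then st2.1 ++ [st2.2] else st2.1,
             st2.2 + 1))
          st)
      (acc, j))
      = (acc ++ flatA l j, j + 8 * l.length) := by
  intro l
  induction l with
  | nil => intro acc j; simp [flatA]
  | cons byte t ih =>
    intro acc j
    simp only [List.foldl_cons]
    rw [innerA_go (fun i => PySem.Int.band byte ((1 : Int) <<< i) ≠ 0)]
    rw [ih]
    simp only [flatA, List.length_range, List.length_cons, Prod.mk.injEq]
    refine ⟨by push_cast; simp [List.append_assoc], by push_cast; ring⟩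

theorem foldB_flat : ∀ (l : List Int) (k : Int) (acc : List Int),
    (PySem.List.enumerate l k).foldl
        (fun acc p => altByte (p.1 * 8) (PySem.Int.band p.2 255).toNat acc) acc
      = acc ++ flatB l k := by
  intro l
  induction l with
  | nil => intro k acc; simp [PySem.List.enumerate_nil, flatB]
  | cons byte t ih =>
    intro k acc
    rw [PySem.List.enumerate_cons]
    simp only [List.foldl_cons]
    rw [altByte_gB _ _ _ _ (le_refl _), ih]
    simp [flatB, List.append_assoc]

theorem flatA_eq_flatB : ∀ (l : List Int) (k : Int), flatA l (k * 8) = flatB l k := by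
  intro l
  induction l with
  | nil => intro k; simp [flatA, flatB]
  | cons byte t ih =>
    intro k
    simp only [flatA, flatB]
    have hnext : k * 8 + 8 = (k + 1) * 8 := by ring
    rw [hnext, ih (k + 1)]
    congr 1
    -- per-byte lists agree
    have hb : (PySem.Int.band byte 255).toNat < 256 := band255_lt byte
    have hgB := gB_filter ⟨(PySem.Int.band byte 255).toNat, hb⟩
    simp only at hgB
    rw [hgB]
    have hrange : List.range 8 = List.range' 0 8 := by rw [List.range_eq_range']
    rw [hrange]
    have := selGo_range' (fun i => decide (PySem.Int.band byte ((1 : Int) <<< i) ≠ 0)) 8 0 (k * 8)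
    simp only [Nat.cast_zero, add_zero] at this
    rw [this]
    have hf : List.filter (fun (i : Nat) => decide (PySem.Int.band byte ((1 : Int) <<< i) ≠ 0)) (List.range' 0 8)
        = List.filter (fun i => (PySem.Int.band byte 255).toNat.testBit i) (List.range' 0 8) := by
      apply List.filter_congr
      intro i hi
      have hi8 : i < 8 := by rw [List.mem_range'] at hi; omega
      exact cond_eq_testBit byte hi8
    rw [hf]

-- ===== VERDICT (by name: the statement is the Claim_ definition above) =====
theorem bytearray_to_bits_spec : Claim_equal_bytearray_to_bits := by
  intro l _
  unfold Spec_bytearray_to_bits bytearray_to_bits bytearray_to_bits_alt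
  rw [foldA_flat l [] 0, foldB_flat l 0 []]
  have h := flatA_eq_flatB l 0
  norm_num at h
  simp only [List.nil_append]
  exact h
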